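-- pv_equiv track=rewrite | github.com/mbeggas/vscode-lab | sumPositiveNumbers.py | sumPositiveNumbers
-- ===== SOURCE A (Python) =====
-- def sumPositiveNumbers(numbers):
--     if not isinstance(numbers, list):
--         raise TypeError("Input must be a list of numbers.")
--
--     total = 0
--     for num in numbers:
--         if num < 0:
--             raise ValueError(f"Negative number found: {num}")
--         total += num
--     return total
-- ===== SOURCE B (Python) =====
-- def sumPositiveNumbers(numbers):
--     if not isinstance(numbers, list):
--         raise TypeError("Input must be a list of numbers.")
--     if numbers and min(numbers) < 0:
--         raise ValueError(f"Negative number found: {next(n for n in numbers if n < 0)}")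
--     return sum(numbers)
-- ===== Notes on version B (the rewrite author's own statement) =====
-- stated objective: alternative
-- what changed: Replaces A's fused accumulate-and-check loop by a whole-list min() test to detect negatives, then the built-in sum(numbers); no element-by-element accumulator loop remains.
import Mathlib
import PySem

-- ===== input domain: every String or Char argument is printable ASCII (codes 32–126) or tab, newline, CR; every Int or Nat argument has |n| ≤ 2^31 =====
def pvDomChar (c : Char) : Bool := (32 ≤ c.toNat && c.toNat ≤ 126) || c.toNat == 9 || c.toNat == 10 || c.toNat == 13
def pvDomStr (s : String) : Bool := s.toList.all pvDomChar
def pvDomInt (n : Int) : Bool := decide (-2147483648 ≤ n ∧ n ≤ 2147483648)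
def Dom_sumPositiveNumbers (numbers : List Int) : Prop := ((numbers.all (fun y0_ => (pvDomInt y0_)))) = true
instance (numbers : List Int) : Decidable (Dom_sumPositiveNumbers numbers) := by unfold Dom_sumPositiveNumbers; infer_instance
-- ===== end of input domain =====

-- B detects negatives with a whole-list min() test and returns sum(numbers); no fused accumulator loop (objective: alternative).

-- ===== PORT A =====
-- A's fused loop: accumulate, raising on the first negative (the raise branch is
-- excluded by Pre_; its result there is a dummy).
def sumPositiveNumbersGo (total : Int) : List Int → Int
  | [] => total
  | num :: rest => if num < 0 then total else sumPositiveNumbersGo (total + num) rest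

def sumPositiveNumbers (numbers : List Int) : Int := sumPositiveNumbersGo 0 numbers

-- ===== PORT B =====
-- 'if numbers and min(numbers) < 0: raise' — the raise branch is excluded by Pre_
-- (dummy value 0 there); otherwise sum(numbers).
def sumPositiveNumbers_alt (numbers : List Int) : Int :=
  match PySem.List.min? numbers (fun x => x) with
  | some m => if m < 0 then 0 else numbers.sum
  | none => numbers.sum

-- ===== PRECONDITION & SPEC =====
-- A raises ValueError on the first negative element; Pre_ excludes lists with a negative.
def Pre_sumPositiveNumbers (numbers : List Int) : Prop := ∀ x ∈ numbers, 0 ≤ x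
instance (numbers : List Int) : Decidable (Pre_sumPositiveNumbers numbers) := by
  unfold Pre_sumPositiveNumbers; infer_instance

def pvWitness_sumPositiveNumbers : List Int := [1, 0, 7]

def Spec_sumPositiveNumbers (numbers : List Int) (out : Int) : Prop := out = sumPositiveNumbers_alt numbers
instance (numbers : List Int) (out : Int) : Decidable (Spec_sumPositiveNumbers numbers out) := by unfold Spec_sumPositiveNumbers; infer_instance

-- ===== CLAIM =====
def Claim_equal_sumPositiveNumbers : Prop := ∀ (numbers : List Int), Dom_sumPositiveNumbers numbers → Pre_sumPositiveNumbers numbers → Spec_sumPositiveNumbers numbers (sumPositiveNumbers numbers)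

-- ===== LEMMAS AND PROOFS =====
theorem sumPositiveNumbersGo_nonneg (numbers : List Int) (h : ∀ x ∈ numbers, 0 ≤ x) (total : Int) :
    sumPositiveNumbersGo total numbers = total + numbers.sum := by
  induction numbers generalizing total with
  | nil => simp [sumPositiveNumbersGo]
  | cons num rest ih =>
    have h0 : (0:Int) ≤ num := h num (by simp)
    simp only [sumPositiveNumbersGo, if_neg (by omega : ¬ num < 0)]
    rw [ih (fun x hx => h x (by simp [hx]))]
    simp [List.sum_cons]; ring

-- ===== VERDICT =====
theorem sumPositiveNumbers_spec : Claim_equal_sumPositiveNumbers := by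
  intro numbers _ hpre
  unfold Spec_sumPositiveNumbers sumPositiveNumbers sumPositiveNumbers_alt
  rw [sumPositiveNumbersGo_nonneg numbers hpre 0]
  cases hm : PySem.List.min? numbers (fun x => x) with
  | none => simp
  | some m =>
    have hmem := PySem.List.min?_mem hm
    have : (0:Int) ≤ m := hpre m hmem
    simp [if_neg (by omega : ¬ m < 0)]
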